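-- pv_equiv track=rewrite | github.com/Do-code-ing/Python_Clone_Instagram | instagram/views.py | text_to_hashtag
-- ===== SOURCE A (Python) =====
-- from collections import deque
--
-- def text_to_hashtag(texts):
--     texts = texts.lower()
--     texts = texts.split("\r\n")
--     tags = []
--     comments = []
--
--     for text in texts:
--         tagging = False
--         temp = []
--         q = deque(text)
--         while q:
--             x = q.popleft()
--
--             if x == "#":
--                 if tagging:
--                     comments.append(temp)
--                 temp = ["#"]
--                 tagging = True
--             elif x == " ":
--                 if tagging and len(temp) > 1:
--                     tags.append(temp)
--                 else:
--                     temp.append(x)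
--                     comments.append(temp)
--                 temp = []
--                 tagging = False
--             else:
--                 temp.append(x)
--
--         if temp:
--             if temp[0] == "#" and len(temp) > 1:
--                 tags.append(temp)
--             else:
--                 comments.append(temp)
--
--         if comments and comments[-1] != ["\n"]:
--             comments.append(["\n"])
--
--     return tags, comments
-- ===== SOURCE B (Python) =====
-- def text_to_hashtag(texts):
--     tags = []
--     comments = []
--     for line in texts.lower().split("\r\n"):
--         chunks = line.split(" ")
--         last_chunk = len(chunks) - 1
--         for i, chunk in enumerate(chunks):
--             parts = chunk.split("#")
--             toks = [parts[0]] + ["#" + p for p in parts[1:]]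
--             # tokens cut short by a following '#': kept only if they are tags-in-progress
--             for t in toks[:-1]:
--                 if t.startswith("#"):
--                     comments.append(list(t))
--             last = toks[-1]
--             if i < last_chunk:                      # token ended by a space
--                 if last.startswith("#") and len(last) > 1:
--                     tags.append(list(last))
--                 else:
--                     comments.append(list(last) + [" "])
--             elif last:                              # token ended by end of line
--                 if last.startswith("#") and len(last) > 1:
--                     tags.append(list(last))
--                 else:
--                     comments.append(list(last))
--         if comments and comments[-1] != ["\n"]:
--             comments.append(["\n"])
--     return tags, comments
-- ===== Notes on version B (the rewrite author's own statement) =====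
-- stated objective: alternative
-- what changed: A consumes each line character by character from a deque with a tagging/temp state machine; B instead splits each line on spaces into chunks and each chunk on the hash sign into tokens, then classifies whole tokens (tag vs comment, with the trailing-space and discarded-prefix rules falling out of the split structure).
import Mathlib
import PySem

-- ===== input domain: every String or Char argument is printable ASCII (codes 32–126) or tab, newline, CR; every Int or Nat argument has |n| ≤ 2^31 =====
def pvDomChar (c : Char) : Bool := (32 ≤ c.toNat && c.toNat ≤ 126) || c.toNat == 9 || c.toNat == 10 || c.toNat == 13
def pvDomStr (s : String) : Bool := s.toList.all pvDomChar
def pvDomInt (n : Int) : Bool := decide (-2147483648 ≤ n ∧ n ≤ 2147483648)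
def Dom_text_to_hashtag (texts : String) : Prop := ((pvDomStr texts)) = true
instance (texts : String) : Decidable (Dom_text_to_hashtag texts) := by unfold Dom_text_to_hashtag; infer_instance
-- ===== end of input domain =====

-- B replaces A's character-by-character deque state machine by a split-based decomposition
-- (split each line on spaces into chunks, each chunk on '#' into tokens, classify the tokens);
-- objective: alternative decomposition, same return value.
-- Both ports carry tokens as List Char and render each character as a 1-character String only
-- at the very end (Python's list(str) of 1-character strings), which is value-identical.

-- ===== PORT A =====
def pvStrs (cs : List Char) : List String := cs.map (fun c => c.toString)

-- the 'while q' loop of A: state (tagging, temp, tags, comments)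
def pvA_loop : List Char → Bool → List Char → List (List Char) → List (List Char) →
    Bool × List Char × List (List Char) × List (List Char)
  | [], tagging, temp, tags, comments => (tagging, temp, tags, comments)
  | x :: q, tagging, temp, tags, comments =>
    if x = '#' then
      pvA_loop q true ['#'] tags (if tagging then comments ++ [temp] else comments)
    else if x = ' ' then
      if tagging ∧ 1 < temp.length then pvA_loop q false [] (tags ++ [temp]) comments
      else pvA_loop q false [] tags (comments ++ [temp ++ [' ']])
    else
      pvA_loop q tagging (temp ++ [x]) tags comments

-- 'if temp: …' after the while loop
def pvA_finish (st : Bool × List Char × List (List Char) × List (List Char)) :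
    List (List Char) × List (List Char) :=
  if st.2.1 ≠ [] then
    if st.2.1.head? = some '#' ∧ 1 < st.2.1.length then (st.2.2.1 ++ [st.2.1], st.2.2.2)
    else (st.2.2.1, st.2.2.2 ++ [st.2.1])
  else (st.2.2.1, st.2.2.2)

def pvA_lines : List (List Char) → List (List Char) → List (List Char) →
    List (List Char) × List (List Char)
  | [], tags, comments => (tags, comments)
  | line :: rest, tags, comments =>
    let r := pvA_finish (pvA_loop line false [] tags comments)
    pvA_lines rest r.1
      (if r.2 ≠ [] ∧ r.2.getLast? ≠ some ['\n'] then r.2 ++ [['\n']] else r.2)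

def text_to_hashtag (texts : String) : List (List String) × List (List String) :=
  let r := pvA_lines (PySem.Chars.splitOn (PySem.Chars.lower texts.toList) ['\r', '\n']) [] []
  (r.1.map pvStrs, r.2.map pvStrs)

-- ===== PORT B =====
-- toks = [parts[0]] + ["#" + p for p in parts[1:]]
def pvB_toks (chunk : List Char) : List (List Char) :=
  match PySem.Chars.splitOn chunk ['#'] with
  | [] => []            -- unreachable: a split result is never empty
  | p :: ps => p :: ps.map (fun t => '#' :: t)

-- classification of one chunk's tokens
def pvB_chunk (chunk : List Char) (endsWithSpace : Bool) (tags comments : List (List Char)) :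
    List (List Char) × List (List Char) :=
  let toks := pvB_toks chunk
  let comments := comments ++ toks.dropLast.filter (fun t => PySem.Chars.startswith t ['#'])
  match toks.getLast? with
  | none => (tags, comments)    -- unreachable: toks is never empty
  | some last =>
    if endsWithSpace then
      if PySem.Chars.startswith last ['#'] ∧ 1 < last.length then (tags ++ [last], comments)
      else (tags, comments ++ [last ++ [' ']])
    else if last ≠ [] then
      if PySem.Chars.startswith last ['#'] ∧ 1 < last.length then (tags ++ [last], comments)
      else (tags, comments ++ [last])
    else (tags, comments)

-- 'for i, chunk in enumerate(chunks)' with endsWithSpace = (i < last_chunk)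
def pvB_chunks : List (List Char) → List (List Char) → List (List Char) →
    List (List Char) × List (List Char)
  | [], tags, comments => (tags, comments)
  | [c], tags, comments => pvB_chunk c false tags comments
  | c :: c2 :: rest, tags, comments =>
    let r := pvB_chunk c true tags comments
    pvB_chunks (c2 :: rest) r.1 r.2

def pvB_lines : List (List Char) → List (List Char) → List (List Char) →
    List (List Char) × List (List Char)
  | [], tags, comments => (tags, comments)
  | line :: rest, tags, comments =>
    let r := pvB_chunks (PySem.Chars.splitOn line [' ']) tags comments
    pvB_lines rest r.1
      (if r.2 ≠ [] ∧ r.2.getLast? ≠ some ['\n'] then r.2 ++ [['\n']] else r.2)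

def text_to_hashtag_alt (texts : String) : List (List String) × List (List String) :=
  let r := pvB_lines (PySem.Chars.splitOn (PySem.Chars.lower texts.toList) ['\r', '\n']) [] []
  (r.1.map pvStrs, r.2.map pvStrs)

-- ===== PRECONDITION & SPEC =====
def Spec_text_to_hashtag (texts : String) (out : List (List String) × List (List String)) : Prop := out = text_to_hashtag_alt texts
instance (texts : String) (out : List (List String) × List (List String)) : Decidable (Spec_text_to_hashtag texts out) := by unfold Spec_text_to_hashtag; infer_instance

-- ===== CLAIM (what is proved, stated in full; the proofs are below) =====
def Claim_equal_text_to_hashtag : Prop := ∀ (texts : String), Dom_text_to_hashtag texts → Spec_text_to_hashtag texts (text_to_hashtag texts)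

-- ===== LEMMAS AND PROOFS =====

-- PySem's splitOn with a one-character separator is Lean's List.splitOn
theorem pv_go_eq (c : Char) : ∀ (fuel : Nat) (l cur : List Char) (acc : List (List Char)),
    l.length ≤ fuel →
    PySem.Chars.splitOn.go [c] fuel l cur acc
      = acc.reverse ++ (l.splitOn c).modifyHead (cur.reverse ++ ·) := by
  intro fuel
  induction fuel with
  | zero =>
    intro l cur acc h
    have : l = [] := by cases l <;> simp_all
    subst this
    simp [PySem.Chars.splitOn.go, List.splitOn]
  | succ n ih =>
    intro l cur acc h
    cases l with
    | nil => simp [PySem.Chars.splitOn.go, List.splitOn]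
    | cons x rest =>
      by_cases hx : x = c
      · subst hx
        simp only [PySem.Chars.splitOn.go, List.isPrefixOf, BEq.rfl, Bool.true_and,
          if_true, List.length_cons, List.length_nil, Nat.zero_add, List.drop_succ_cons,
          List.drop_zero]
        rw [ih rest [] (cur.reverse :: acc) (by simpa using Nat.le_of_succ_le_succ h)]
        simp [List.splitOn, List.splitOnP_cons]
        cases List.splitOnP (fun y => y == x) rest <;> simp
      · simp only [PySem.Chars.splitOn.go, List.isPrefixOf, Bool.and_true, beq_iff_eq]
        rw [if_neg (by simpa using fun hh => hx hh.symm)]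
        rw [ih rest (x :: cur) acc (by simpa using Nat.le_of_succ_le_succ h)]
        simp only [List.splitOn, List.splitOnP_cons]
        rw [if_neg (by simp [hx])]
        rw [List.modifyHead_modifyHead]
        cases List.splitOnP (fun y => y == c) rest <;> simp

theorem pv_splitOn_single (s : List Char) (c : Char) :
    PySem.Chars.splitOn s [c] = s.splitOn c := by
  rw [PySem.Chars.splitOn, pv_go_eq c (s.length + 1) s [] [] (Nat.le_succ _)]
  cases hsp : s.splitOn c <;> simp

-- a separator-free prefix merges into the first piece of a split
theorem pv_splitOn_append (c : Char) (t l : List Char) (h : c ∉ t) :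
    (t ++ l).splitOn c = (l.splitOn c).modifyHead (t ++ ·) := by
  induction t with
  | nil => cases hsp : l.splitOn c <;> simp [hsp]
  | cons x xs ih =>
    have hx : ¬ x = c := by rintro rfl; exact h List.mem_cons_self
    simp only [List.cons_append, List.splitOn, List.splitOnP_cons, beq_iff_eq, hx, if_false]
    rw [show List.splitOnP (fun y => y == c) (xs ++ l) = (xs ++ l).splitOn c from rfl,
      ih (fun hm => h (List.mem_cons_of_mem _ hm)), List.modifyHead_modifyHead]
    have hrw : List.splitOnP (fun y => y == c) l = l.splitOn c := rfl
    rw [hrw]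
    cases hsp : l.splitOn c <;> simp

theorem pv_splitOn_cons_self (c : Char) (l : List Char) :
    (c :: l).splitOn c = [] :: l.splitOn c := by
  simp [List.splitOn, List.splitOnP_cons]

theorem pv_splitOn_cons_ne (c x : Char) (l : List Char) (h : x ≠ c) :
    (x :: l).splitOn c = (l.splitOn c).modifyHead (x :: ·) := by
  simp [List.splitOn, List.splitOnP_cons, h]

theorem pv_splitOn_clean (c : Char) (t : List Char) (h : c ∉ t) :
    t.splitOn c = [t] := by
  have := pv_splitOn_append c t [] h
  simpa using this

-- startswith on a '#'-token and on a '#'-free token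
theorem pv_sw_hash (y : List Char) : PySem.Chars.startswith ('#' :: y) ['#'] = true := by
  rw [PySem.Chars.startswith_iff]; exact ⟨y, rfl⟩

theorem pv_sw_clean (t : List Char) (h : '#' ∉ t) :
    PySem.Chars.startswith t ['#'] = false := by
  rw [Bool.eq_false_iff]
  intro hs
  rw [PySem.Chars.startswith_iff] at hs
  obtain ⟨y, rfl⟩ := hs
  exact h (by simp)

-- shape of pvB_toks
theorem pv_toks_hash (h : List Char) :
    pvB_toks ('#' :: h) = [] :: (h.splitOn '#').map (fun t => '#' :: t) := by
  rw [pvB_toks, pv_splitOn_single, pv_splitOn_cons_self]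

theorem pv_toks_clean (t : List Char) (ht : '#' ∉ t) : pvB_toks t = [t] := by
  rw [pvB_toks, pv_splitOn_single, pv_splitOn_clean _ _ ht]
  simp

theorem pv_toks_prepend (t c : List Char) (ht : '#' ∉ t) :
    pvB_toks (t ++ c) = (pvB_toks c).modifyHead (t ++ ·) := by
  rw [pvB_toks, pvB_toks, pv_splitOn_single, pv_splitOn_single, pv_splitOn_append _ _ _ ht]
  obtain ⟨p, ps, hps⟩ := List.exists_cons_of_ne_nil (List.splitOnP_ne_nil (· == '#') c)
  rw [show c.splitOn '#' = p :: ps from hps]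
  simp

-- C1: a '#'-free prefix in front of a '#'-headed chunk is dropped by pvB_chunk
theorem pv_chunk_drop (t h : List Char) (b : Bool) (tags comments : List (List Char))
    (ht : '#' ∉ t) :
    pvB_chunk (t ++ '#' :: h) b tags comments = pvB_chunk ('#' :: h) b tags comments := by
  obtain ⟨m, ms, hm⟩ := List.exists_cons_of_ne_nil
    (List.ne_nil_of_length_pos (by
      have := List.splitOnP_ne_nil (· == '#') h
      simp [List.length_map]
      exact List.length_pos_of_ne_nil this))
    (l := (h.splitOn '#').map (fun t => '#' :: t))
  rw [pvB_chunk, pvB_chunk, pv_toks_prepend _ _ ht, pv_toks_hash, hm]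
  simp [pv_sw_clean t ht, pv_sw_clean [] (by simp)]

-- C2: a pending '#'-token in front of a '#'-headed chunk goes to comments
theorem pv_chunk_flush (t h : List Char) (b : Bool) (tags comments : List (List Char))
    (ht : '#' ∉ t) :
    pvB_chunk ('#' :: (t ++ '#' :: h)) b tags comments
      = pvB_chunk ('#' :: h) b tags (comments ++ ['#' :: t]) := by
  obtain ⟨m, ms, hm⟩ := List.exists_cons_of_ne_nil
    (List.ne_nil_of_length_pos (by
      have := List.splitOnP_ne_nil (· == '#') h
      simp [List.length_map]
      exact List.length_pos_of_ne_nil this))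
    (l := (h.splitOn '#').map (fun t => '#' :: t))
  have htoksL : pvB_toks ('#' :: (t ++ '#' :: h))
      = [] :: ('#' :: t) :: (h.splitOn '#').map (fun t => '#' :: t) := by
    rw [pv_toks_hash, pv_splitOn_append _ _ _ ht, pv_splitOn_cons_self]
    simp
  rw [pvB_chunk, pvB_chunk, htoksL, pv_toks_hash, hm]
  simp [pv_sw_hash, pv_sw_clean [] (by simp)]

-- ===== VERDICT

-- the per-line equivalence: A's state machine from a pending clean token t (tagging false),
-- resp. from a pending tag '#'::t (tagging true), equals B's chunk pipeline on t ++ line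
theorem pv_main : ∀ (line t : List Char) (tags comments : List (List Char)),
    '#' ∉ t → ' ' ∉ t →
    (pvA_finish (pvA_loop line false t tags comments)
        = pvB_chunks ((t ++ line).splitOn ' ') tags comments)
    ∧ (pvA_finish (pvA_loop line true ('#' :: t) tags comments)
        = pvB_chunks ((('#' :: t) ++ line).splitOn ' ') tags comments) := by
  intro line
  induction line with
  | nil =>
    intro t tags comments h1 h2
    constructor
    · rw [List.append_nil, pv_splitOn_clean _ _ h2, pvA_loop]
      cases t with
      | nil => simp [pvA_finish, pvB_chunks, pvB_chunk, pv_toks_clean [] (by simp)]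
      | cons y ys =>
        have hy : ¬ y = '#' := fun e => h1 (e ▸ List.mem_cons_self)
        simp [pvA_finish, pvB_chunks, pvB_chunk, pv_toks_clean _ h1, pv_sw_clean _ h1, hy]
    · rw [List.append_nil, pv_splitOn_clean ' ' ('#' :: t) (by simp [h2]), pvA_loop]
      cases t with
      | nil =>
        simp [pvA_finish, pvB_chunks, pvB_chunk, pv_toks_hash, pv_splitOn_clean '#' [] (by simp),
          pv_sw_hash, pv_sw_clean [] (by simp)]
      | cons y ys =>
        simp [pvA_finish, pvB_chunks, pvB_chunk, pv_toks_hash, pv_splitOn_clean '#' _ h1,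
          pv_sw_hash, pv_sw_clean [] (by simp)]
  | cons x q ih =>
    intro t tags comments h1 h2
    by_cases hxh : x = '#'
    · subst hxh
      obtain ⟨h0, tr, hq⟩ := List.exists_cons_of_ne_nil (List.splitOnP_ne_nil (· == ' ') q)
      have hq' : q.splitOn ' ' = h0 :: tr := hq
      constructor
      · rw [pvA_loop]
        simp only [if_true, Bool.false_eq_true, if_false]
        rw [(ih [] tags comments (by simp) (by simp)).2, List.singleton_append,
          pv_splitOn_append ' ' t _ h2, pv_splitOn_cons_ne ' ' '#' q (by decide), hq']
        cases tr with
        | nil => simp [pvB_chunks, pv_chunk_drop _ _ _ _ _ h1]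
        | cons u us => simp [pvB_chunks, pv_chunk_drop _ _ _ _ _ h1]
      · rw [pvA_loop]
        simp only [if_true]
        rw [(ih [] tags (comments ++ ['#' :: t]) (by simp) (by simp)).2, List.singleton_append,
          show (('#' :: t) ++ '#' :: q) = ('#' :: t) ++ ('#' :: q) from rfl,
          pv_splitOn_append ' ' ('#' :: t) _ (by simp [h2]),
          pv_splitOn_cons_ne ' ' '#' q (by decide), hq']
        cases tr with
        | nil => simp [pvB_chunks, pv_chunk_flush _ _ _ _ _ h1]
        | cons u us => simp [pvB_chunks, pv_chunk_flush _ _ _ _ _ h1]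
    · by_cases hxs : x = ' '
      · subst hxs
        obtain ⟨h0, tr, hq⟩ := List.exists_cons_of_ne_nil (List.splitOnP_ne_nil (· == ' ') q)
        have hq' : q.splitOn ' ' = h0 :: tr := hq
        constructor
        · rw [pvA_loop]
          simp only [if_neg (by decide : ¬ (' ' = '#')), if_true,
            if_neg (by simp : ¬ (false = true ∧ 1 < t.length))]
          rw [(ih [] tags (comments ++ [t ++ [' ']]) (by simp) (by simp)).1, List.nil_append,
            pv_splitOn_append ' ' t _ h2, pv_splitOn_cons_self]
          cases t with
          | nil =>
            simp [pvB_chunks, pvB_chunk, pv_toks_clean [] (by simp), hq']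
          | cons y ys =>
            simp [pvB_chunks, pvB_chunk, pv_toks_clean _ h1, pv_sw_clean _ h1, hq']
        · rw [pvA_loop]
          simp only [if_neg (by decide : ¬ (' ' = '#')), if_true]
          rw [pv_splitOn_append ' ' ('#' :: t) _ (by simp [h2]), pv_splitOn_cons_self, hq']
          cases t with
          | nil =>
            rw [if_neg (by simp)]
            rw [(ih [] tags (comments ++ [['#'] ++ [' ']]) (by simp) (by simp)).1, List.nil_append]
            simp [pvB_chunks, pvB_chunk, pv_toks_hash, pv_splitOn_clean '#' [] (by simp),
              pv_sw_hash, pv_sw_clean [] (by simp), hq']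
          | cons y ys =>
            rw [if_pos (by simp)]
            rw [(ih [] (tags ++ ['#' :: y :: ys]) comments (by simp) (by simp)).1, List.nil_append]
            simp [pvB_chunks, pvB_chunk, pv_toks_hash, pv_splitOn_clean '#' _ h1,
              pv_sw_hash, pv_sw_clean [] (by simp), hq']
      · constructor
        · rw [pvA_loop]
          simp only [if_neg hxh, if_neg hxs]
          rw [(ih (t ++ [x]) tags comments (by simp [h1]; rintro rfl; exact hxh rfl)
              (by simp [h2]; rintro rfl; exact hxs rfl)).1]
          simp
        · rw [pvA_loop]
          simp only [if_neg hxh, if_neg hxs]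
          rw [show ('#' :: t) ++ [x] = '#' :: (t ++ [x]) from by simp,
            (ih (t ++ [x]) tags comments (by simp [h1]; rintro rfl; exact hxh rfl)
              (by simp [h2]; rintro rfl; exact hxs rfl)).2]
          simp

theorem pv_lines_eq : ∀ (ls : List (List Char)) (tags comments : List (List Char)),
    pvA_lines ls tags comments = pvB_lines ls tags comments := by
  intro ls
  induction ls with
  | nil => intro tags comments; rfl
  | cons line rest ih =>
    intro tags comments
    have h := (pv_main line [] tags comments (by simp) (by simp)).1
    rw [List.nil_append] at h
    simp only [pvA_lines, pvB_lines, pv_splitOn_single, h]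
    exact ih _ _

-- ===== VERDICT (by name: the statement is the Claim_ definition above) =====
theorem text_to_hashtag_spec : Claim_equal_text_to_hashtag := by
  intro texts _
  unfold Spec_text_to_hashtag text_to_hashtag text_to_hashtag_alt
  rw [pv_lines_eq]
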